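-- pv_equiv track=rewrite | github.com/JFlic/EarlhamAI | backend/Retrieve.py | extract_sources
-- ===== SOURCE A (Python) =====
-- from typing import List, Dict, Any, Tuple
--
-- def extract_sources(results: List[Dict]) -> List[Dict]:
--     """
--     Extract source information from search results.
--     This consolidates the source extraction logic.
--     """
--     sources = []
--     for result in results:
--         if result['metadata'].get('source') == 'Enactus Room Dataset.md':
--             source_info = {
--                 "heading": result['metadata'].get('heading', 'Unknown Title'),
--                 "source": result['metadata'].get('source', 'None'),
--                 "url": result['metadata'].get('url', None),
--                 "page": result['metadata'].get('page', None)
--             }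
--             sources.append(source_info)
--             break
--         else:
--             source_info = {
--                 "heading": result['metadata'].get('heading', 'Unknown Title'),
--                 "source": result['metadata'].get('source', 'None'),
--                 "url": result['metadata'].get('url', None),
--                 "page": result['metadata'].get('page', None)
--             }
--             sources.append(source_info)
--     return sources
-- ===== SOURCE B (Python) =====
-- def extract_sources(results):
--     idx = next((i for i, r in enumerate(results)
--                 if r['metadata'].get('source') == 'Enactus Room Dataset.md'), None)
--     chosen = results if idx is None else results[:idx + 1]
--     return [{
--         "heading": r['metadata'].get('heading', 'Unknown Title'),
--         "source": r['metadata'].get('source', 'None'),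
--         "url": r['metadata'].get('url', None),
--         "page": r['metadata'].get('page', None),
--     } for r in chosen]
-- ===== Notes on version B (the rewrite author's own statement) =====
-- stated objective: alternative
-- what changed: The single loop-with-break and mutable accumulator is replaced by a two-phase decomposition: first locate the cut-off index of the first 'Enactus Room Dataset.md' entry, then map a comprehension over the selected prefix.
import Mathlib
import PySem

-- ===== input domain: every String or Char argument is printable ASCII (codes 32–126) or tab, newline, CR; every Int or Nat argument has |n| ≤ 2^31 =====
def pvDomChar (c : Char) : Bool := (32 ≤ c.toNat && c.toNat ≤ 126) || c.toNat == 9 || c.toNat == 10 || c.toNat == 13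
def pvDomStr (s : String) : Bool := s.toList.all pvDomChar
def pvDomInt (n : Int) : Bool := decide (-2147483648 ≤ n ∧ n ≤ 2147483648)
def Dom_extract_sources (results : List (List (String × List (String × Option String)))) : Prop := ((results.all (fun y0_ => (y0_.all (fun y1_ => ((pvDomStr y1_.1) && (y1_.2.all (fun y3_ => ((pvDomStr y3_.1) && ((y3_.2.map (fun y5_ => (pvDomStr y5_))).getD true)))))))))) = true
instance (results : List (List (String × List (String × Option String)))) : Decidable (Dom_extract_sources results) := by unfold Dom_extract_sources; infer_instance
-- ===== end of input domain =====

-- ===== PORT A =====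
-- B replaces A's loop-with-break by index-finding + prefix mapping (alternative decomposition, same cost).
-- Equivalence is about return values; where Python A raises KeyError (missing 'metadata' before the
-- cut-off), the port uses .getD [] and the input is excluded by Pre_.

def pvMkInfoA (md : List (String × Option String)) : List (String × Option String) :=
  [("heading", (md.lookup "heading").getD (some "Unknown Title")),
   ("source", (md.lookup "source").getD (some "None")),
   ("url", (md.lookup "url").getD none),
   ("page", (md.lookup "page").getD none)]

def pvLoopA : List (List (String × List (String × Option String))) → List (List (String × Option String)) → List (List (String × Option String))
  | [], sources => sources
  | r :: rest, sources =>
    let md := (r.lookup "metadata").getD []   -- result['metadata']; KeyError case excluded by Pre_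
    if (md.lookup "source").getD none = some "Enactus Room Dataset.md" then
      sources ++ [pvMkInfoA md]               -- append then break
    else
      pvLoopA rest (sources ++ [pvMkInfoA md])

def extract_sources (results : List (List (String × List (String × Option String)))) : List (List (String × Option String)) :=
  pvLoopA results []

-- ===== PORT B =====
-- shared with Pre_: the cut-off predicate r['metadata'].get('source') == 'Enactus Room Dataset.md'
def pvIsCut (r : List (String × List (String × Option String))) : Bool :=
  (((r.lookup "metadata").getD []).lookup "source").getD none == some "Enactus Room Dataset.md"

def extract_sources_alt (results : List (List (String × List (String × Option String)))) : List (List (String × Option String)) :=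
  let idx := results.findIdx? pvIsCut
  let chosen := match idx with
    | none => results
    | some i => results.take (i + 1)          -- results[:idx+1] with idx ≥ 0
  chosen.map (fun r =>
    let md := (r.lookup "metadata").getD []
    [("heading", (md.lookup "heading").getD (some "Unknown Title")),
     ("source", (md.lookup "source").getD (some "None")),
     ("url", (md.lookup "url").getD none),
     ("page", (md.lookup "page").getD none)])

-- ===== PRECONDITION & SPEC =====
-- Pre_ excludes exactly the inputs where Python A raises KeyError: an entry without a
-- 'metadata' key occurring at or before the first cut-off entry.
def Pre_extract_sources (results : List (List (String × List (String × Option String)))) : Prop :=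
  ∀ r ∈ results.takeWhile (fun r => !pvIsCut r), (r.lookup "metadata").isSome = true

instance (results : List (List (String × List (String × Option String)))) : Decidable (Pre_extract_sources results) := by unfold Pre_extract_sources; infer_instance

def pvWitness_extract_sources : (List (List (String × List (String × Option String)))) :=
  [[("metadata", [("heading", some "Rooms"), ("source", some "Enactus Room Dataset.md")])],
   [("metadata", [("source", some "other.md")])]]

def Spec_extract_sources (results : List (List (String × List (String × Option String)))) (out : List (List (String × Option String))) : Prop := out = extract_sources_alt results
instance (results : List (List (String × List (String × Option String)))) (out : List (List (String × Option String))) : Decidable (Spec_extract_sources results out) := by unfold Spec_extract_sources; infer_instance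

-- ===== CLAIM (what is proved, stated in full; the proofs are below) =====
def Claim_equal_extract_sources : Prop := ∀ (results : List (List (String × List (String × Option String)))), Dom_extract_sources results → Pre_extract_sources results → Spec_extract_sources results (extract_sources results)

-- ===== LEMMAS AND PROOFS =====

theorem pvLoopA_eq_alt (l : List (List (String × List (String × Option String))))
    (acc : List (List (String × Option String))) :
    pvLoopA l acc = acc ++ extract_sources_alt l := by
  induction l generalizing acc with
  | nil => simp [pvLoopA, extract_sources_alt]
  | cons r rest ih =>
    by_cases h : (((r.lookup "metadata").getD []).lookup "source").getD none = some "Enactus Room Dataset.md"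
    · simp [pvLoopA, extract_sources_alt, List.findIdx?_cons, pvIsCut, h, pvMkInfoA]
    · rw [pvLoopA]
      simp only [h, if_false]
      rw [ih]
      have hcut : pvIsCut r = false := by simp [pvIsCut, h]
      unfold extract_sources_alt
      rw [List.findIdx?_cons, hcut]
      cases hfi : rest.findIdx? pvIsCut with
      | none => simp [pvMkInfoA]
      | some i => simp [pvMkInfoA, List.take_succ_cons]

-- ===== VERDICT (by name: the statement is the Claim_ definition above) =====
theorem extract_sources_spec : Claim_equal_extract_sources := by
  intro results _ _
  unfold Spec_extract_sources extract_sources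
  simpa using pvLoopA_eq_alt results []
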